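-- pv_equiv track=rewrite | github.com/kyngskwk/solving-problems | SW Expert Academy/ Programming Intermediate/LIST1/1208.Flatten.py | my_dump
-- ===== SOURCE A (Python) =====
-- def my_dump(dump, box_list):
--     for p in range(dump):
--         box_list = sorted(box_list)
--         box_list[0] += 1
--         box_list[-1] -= 1
--         if box_list[-1] - box_list[0] == 1:
--             break
--
--     box_list = sorted(box_list)
--     return box_list[-1] - box_list[0]
-- ===== SOURCE B (Python) =====
-- def _insert_left(lst, x):
--     # insert x before the first element >= x (scan from the front)
--     i = 0
--     while i < len(lst) and lst[i] < x:
--         i += 1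
--     lst.insert(i, x)
--
-- def _insert_right(lst, x):
--     # insert x after the last element <= x (scan from the back)
--     i = len(lst)
--     while i > 0 and lst[i - 1] > x:
--         i -= 1
--     lst.insert(i, x)
--
-- def my_dump(dump, box_list):
--     s = sorted(box_list)
--     if len(s) == 1:
--         return 0
--     for _ in range(dump):
--         lo, hi = s[0], s[-1]
--         mid = s[1:-1]
--         _insert_left(mid, lo + 1)
--         _insert_right(mid, hi - 1)
--         s = mid
--         if (hi - 1) - (lo + 1) == 1:
--             break
--     return s[-1] - s[0]
-- ===== Notes on version B (the rewrite author's own statement) =====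
-- stated objective: alternative
-- what changed: B sorts once and then maintains the sorted order incrementally: each dump removes the first and last elements and ordered-inserts min+1 and max-1 back, instead of re-sorting the whole list every iteration; a singleton list is answered 0 up front.
import Mathlib
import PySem

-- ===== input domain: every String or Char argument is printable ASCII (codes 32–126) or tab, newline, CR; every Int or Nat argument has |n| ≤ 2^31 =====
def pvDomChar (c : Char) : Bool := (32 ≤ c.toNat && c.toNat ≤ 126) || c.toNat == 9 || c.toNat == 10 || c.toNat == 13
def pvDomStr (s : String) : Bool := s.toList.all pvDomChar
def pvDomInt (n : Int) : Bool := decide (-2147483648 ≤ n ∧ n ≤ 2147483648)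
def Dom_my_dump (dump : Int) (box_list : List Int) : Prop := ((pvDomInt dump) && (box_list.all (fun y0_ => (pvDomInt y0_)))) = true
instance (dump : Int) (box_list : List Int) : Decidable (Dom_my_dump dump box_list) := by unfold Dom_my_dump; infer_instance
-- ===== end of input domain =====

-- B sorts once and maintains the sorted order by ordered insertion instead of re-sorting on every dump
-- (objective: alternative decomposition, same result).

-- ===== PORT A =====
-- one loop body: box_list = sorted(box_list); box_list[0] += 1; box_list[-1] -= 1
def myDumpStepA (l : List Int) : List Int :=
  let s := PySem.List.sorted l (fun x => x) false
  match PySem.List.pyGet? s 0 with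
  | none => []          -- IndexError in Python (empty list); excluded by Pre_
  | some v0 =>
    let s1 := s.set 0 (v0 + 1)
    match PySem.List.pyGet? s1 (-1) with
    | none => []        -- IndexError in Python; excluded by Pre_
    | some v1 => s1.set (s1.length - 1) (v1 - 1)   -- box_list[-1] -= 1 on a nonempty list

-- for p in range(dump): … ; if box_list[-1] - box_list[0] == 1: break
def myDumpLoopA : Nat → List Int → List Int
  | 0, l => l
  | f + 1, l =>
    let s2 := myDumpStepA l
    if (PySem.List.pyGet? s2 (-1)).getD 0 - (PySem.List.pyGet? s2 0).getD 0 == 1 then s2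
    else myDumpLoopA f s2

def my_dump (dump : Int) (box_list : List Int) : Int :=
  let fin := myDumpLoopA dump.toNat box_list
  let s := PySem.List.sorted fin (fun x => x) false
  (PySem.List.pyGet? s (-1)).getD 0 - (PySem.List.pyGet? s 0).getD 0

-- ===== PORT B =====
-- _insert_left: insert x before the first element ≥ x
def insLeft (x : Int) : List Int → List Int
  | [] => [x]
  | y :: ys => if y < x then y :: insLeft x ys else x :: y :: ys

-- _insert_right scans from the back and inserts x after the last element ≤ x;
-- on a sorted list (the only lists it is applied to here) that is the position
-- before the first element > x, which is what this structural scan computes.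
def insRight (x : Int) : List Int → List Int
  | [] => [x]
  | y :: ys => if x < y then x :: y :: ys else y :: insRight x ys

def myDumpLoopB : Nat → List Int → List Int
  | 0, s => s
  | f + 1, s =>
    match s with
    | [] => []          -- IndexError in Python (s[0] on empty); excluded by Pre_
    | _ :: _ =>
      let lo := s.headD 0
      let hi := s.getLastD 0
      let mid := PySem.List.slice s (some 1) (some (-1))   -- s[1:-1]
      let s' := insRight (hi - 1) (insLeft (lo + 1) mid)
      if (hi - 1) - (lo + 1) == 1 then s' else myDumpLoopB f s'

def my_dump_alt (dump : Int) (box_list : List Int) : Int :=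
  let s := PySem.List.sorted box_list (fun x => x) false
  if s.length == 1 then 0
  else
    let t := myDumpLoopB dump.toNat s
    t.getLastD 0 - t.headD 0

-- ===== PRECONDITION & SPEC =====
-- A raises IndexError on the empty list (box_list[0] / box_list[-1]); B raises there too.
def Pre_my_dump (dump : Int) (box_list : List Int) : Prop := box_list ≠ []
instance (dump : Int) (box_list : List Int) : Decidable (Pre_my_dump dump box_list) := by unfold Pre_my_dump; infer_instance
def pvWitness_my_dump : Int × List Int := (3, [1, 5, 2])

def Spec_my_dump (dump : Int) (box_list : List Int) (out : Int) : Prop := out = my_dump_alt dump box_list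
instance (dump : Int) (box_list : List Int) (out : Int) : Decidable (Spec_my_dump dump box_list out) := by unfold Spec_my_dump; infer_instance

-- ===== CLAIM (what is proved, stated in full; the proofs are below) =====
def Claim_equal_my_dump : Prop := ∀ (dump : Int) (box_list : List Int), Dom_my_dump dump box_list → Pre_my_dump dump box_list → Spec_my_dump dump box_list (my_dump dump box_list)

-- ===== LEMMAS AND PROOFS =====

theorem stepA_eq (l : List Int) (a b : Int) (mid : List Int)
    (hs : PySem.List.sorted l (fun x => x) false = a :: (mid ++ [b])) :
    myDumpStepA l = (a + 1) :: (mid ++ [b - 1]) := by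
  simp only [myDumpStepA, hs]
  split
  next h0 => rw [PySem.List.pyGet?_zero_cons] at h0; cases h0
  next v0 h0 =>
    rw [PySem.List.pyGet?_zero_cons] at h0
    injection h0 with h0
    subst h0
    have hset0 : (a :: (mid ++ [b])).set 0 (a + 1) = (a + 1) :: (mid ++ [b]) := rfl
    rw [hset0]
    split
    next h1 =>
      rw [PySem.List.pyGet?_neg_one] at h1
      simp at h1
    next v1 h1 =>
      rw [PySem.List.pyGet?_neg_one] at h1
      rw [show ((a + 1) :: (mid ++ [b])).getLast? = some b by
        rw [show (a + 1) :: (mid ++ [b]) = ((a + 1) :: mid) ++ [b] by simp]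
        exact List.getLast?_concat] at h1
      injection h1 with h1
      subst h1
      have h2 : ((a + 1) :: (mid ++ [b])).length - 1 = ([a + 1] ++ mid).length := by simp
      rw [h2, show (a + 1) :: (mid ++ [b]) = ([a + 1] ++ mid) ++ [b] by simp,
          List.set_append_right _ _ (le_refl _)]
      simp

theorem insLeft_eq_orderedInsert (x : Int) (l : List Int) :
    insLeft x l = l.orderedInsert (· ≤ ·) x := by
  induction l with
  | nil => rfl
  | cons y ys ih =>
      simp only [insLeft, List.orderedInsert, ih]
      by_cases h : x ≤ y
      · simp [h, not_lt.mpr h]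
      · simp [h, lt_of_not_ge h]

theorem insLeft_perm (x : Int) (l : List Int) : (insLeft x l).Perm (x :: l) := by
  rw [insLeft_eq_orderedInsert]; exact List.perm_orderedInsert _ x l

theorem insLeft_sorted (x : Int) (l : List Int) (h : l.Pairwise (· ≤ ·)) :
    (insLeft x l).Pairwise (· ≤ ·) := by
  rw [insLeft_eq_orderedInsert]
  exact List.Pairwise.orderedInsert x l h

theorem insRight_perm (x : Int) (l : List Int) : (insRight x l).Perm (x :: l) := by
  induction l with
  | nil => exact List.Perm.refl _
  | cons y ys ih =>
      simp only [insRight]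
      split
      · exact List.Perm.refl _
      · exact (List.Perm.cons y ih).trans (List.Perm.swap x y ys)

theorem insRight_sorted (x : Int) (l : List Int) (h : l.Pairwise (· ≤ ·)) :
    (insRight x l).Pairwise (· ≤ ·) := by
  induction l with
  | nil => simp [insRight]
  | cons y ys ih =>
      rcases List.pairwise_cons.mp h with ⟨hy, hys⟩
      simp only [insRight]
      split
      next hxy =>
        refine List.pairwise_cons.mpr ⟨?_, h⟩
        intro z hz
        rcases List.mem_cons.mp hz with rfl | hz
        · omega
        · exact le_trans (le_of_lt hxy) (hy z hz)
      next hxy =>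
        refine List.pairwise_cons.mpr ⟨?_, ih hys⟩
        intro z hz
        rcases List.mem_cons.mp ((insRight_perm x ys).mem_iff.mp hz) with rfl | hz'
        · omega
        · exact hy z hz'

theorem sortedA_eq_step (a b : Int) (mid : List Int)
    (hmid : mid.Pairwise (· ≤ ·)) :
    PySem.List.sorted ((a + 1) :: (mid ++ [b - 1])) (fun x => x) false
      = insRight (b - 1) (insLeft (a + 1) mid) := by
  apply PySem.List.sorted_id_eq_of_perm_of_pairwise
  · refine ((insRight_perm _ _).trans (List.Perm.cons _ (insLeft_perm _ _))).trans ?_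
    refine (List.Perm.swap _ _ _).trans (List.Perm.cons _ ?_)
    exact List.perm_append_comm (l₁ := [b - 1])
  · exact insRight_sorted _ _ (insLeft_sorted _ _ hmid)

theorem slice_one_negone (a b : Int) (mid : List Int) :
    PySem.List.slice (a :: (mid ++ [b])) (some 1) (some (-1)) = mid := by
  simp [PySem.List.slice]

theorem decomp_two (s : List Int) (h : 2 ≤ s.length) :
    ∃ a mid b, s = a :: (mid ++ [b]) := by
  match s, h with
  | a :: t, h =>
    have ht : t ≠ [] := by
      intro he; subst he; simp at h
    exact ⟨a, t.dropLast, t.getLast ht, by simp [List.dropLast_concat_getLast ht]⟩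

theorem getLast?_decomp (a b : Int) (mid : List Int) :
    (a :: (mid ++ [b])).getLast? = some b := by
  rw [show a :: (mid ++ [b]) = (a :: mid) ++ [b] by simp]
  exact List.getLast?_concat

theorem getLastD_decomp (a b : Int) (mid : List Int) :
    (a :: (mid ++ [b])).getLastD 0 = b := by
  rw [List.getLastD_eq_getLast?, getLast?_decomp]
  rfl

theorem loopA_succ (f : Nat) (l : List Int) :
    myDumpLoopA (f + 1) l
      = (if (PySem.List.pyGet? (myDumpStepA l) (-1)).getD 0
            - (PySem.List.pyGet? (myDumpStepA l) 0).getD 0 == 1 then myDumpStepA l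
         else myDumpLoopA f (myDumpStepA l)) := rfl

theorem loopB_succ_cons (f : Nat) (x : Int) (xs : List Int) :
    myDumpLoopB (f + 1) (x :: xs)
      = (let s := x :: xs
         let lo := s.headD 0
         let hi := s.getLastD 0
         let mid := PySem.List.slice s (some 1) (some (-1))
         let s' := insRight (hi - 1) (insLeft (lo + 1) mid)
         if (hi - 1) - (lo + 1) == 1 then s' else myDumpLoopB f s') := rfl

theorem loopB_succ_decomp (f : Nat) (a b : Int) (mid : List Int) :
    myDumpLoopB (f + 1) (a :: (mid ++ [b]))
      = (if (b - 1) - (a + 1) == 1 then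
           insRight (b - 1) (insLeft (a + 1) mid)
         else myDumpLoopB f (insRight (b - 1) (insLeft (a + 1) mid))) := by
  rw [loopB_succ_cons]
  simp only [slice_one_negone, List.headD_cons, getLastD_decomp]

-- main invariant: for lists of length ≥ 2, sorting A's loop result gives B's loop result
theorem loop_eq (f : Nat) : ∀ (l : List Int), 2 ≤ l.length →
    PySem.List.sorted (myDumpLoopA f l) (fun x => x) false
      = myDumpLoopB f (PySem.List.sorted l (fun x => x) false) := by
  induction f with
  | zero => intro l _; rfl
  | succ f ih =>
    intro l hl
    obtain ⟨a, mid, b, hs⟩ := decomp_two (PySem.List.sorted l (fun x => x) false)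
      (by rw [PySem.List.length_sorted]; omega)
    have hpw : (a :: (mid ++ [b])).Pairwise (· ≤ ·) := by
      rw [← hs]; exact PySem.List.sorted_pairwise ..
    have hmid : mid.Pairwise (· ≤ ·) := by
      have h2 := (List.pairwise_cons.mp hpw).2
      exact (List.pairwise_append.mp h2).1
    have hstep := stepA_eq l a b mid hs
    have hsortstep := sortedA_eq_step a b mid hmid
    rw [loopA_succ, hs, loopB_succ_decomp]
    rw [hstep]
    rw [show PySem.List.pyGet? ((a + 1) :: (mid ++ [b - 1])) 0 = some (a + 1) from
      PySem.List.pyGet?_zero_cons ..]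
    rw [show PySem.List.pyGet? ((a + 1) :: (mid ++ [b - 1])) (-1) = some (b - 1) by
      rw [PySem.List.pyGet?_neg_one, getLast?_decomp]]
    simp only [Option.getD_some, apply_ite (fun t => PySem.List.sorted t (fun x : Int => x) false)]
    by_cases hc : (b - 1) - (a + 1) == 1
    · rw [if_pos hc, if_pos hc, hsortstep]
    · rw [if_neg hc, if_neg hc, ih ((a + 1) :: (mid ++ [b - 1])) (by simp), hsortstep]

-- a singleton list stays a singleton through A's loop
theorem loopA_singleton (f : Nat) : ∀ (x : Int), myDumpLoopA f [x] = [x] := by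
  induction f with
  | zero => intro x; rfl
  | succ f ih =>
    intro x
    have hsort : PySem.List.sorted [x] (fun y => y) false = [x] :=
      PySem.List.sorted_eq_self_of_pairwise _ _ (by simp)
    have hstep : myDumpStepA [x] = [x] := by
      simp only [myDumpStepA, hsort]
      split
      next h0 => rw [PySem.List.pyGet?_zero_cons] at h0; cases h0
      next v0 h0 =>
        rw [PySem.List.pyGet?_zero_cons] at h0
        injection h0 with h0
        subst h0
        split
        next h1 => rw [PySem.List.pyGet?_neg_one] at h1; simp at h1
        next v1 h1 =>
          rw [PySem.List.pyGet?_neg_one] at h1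
          simp at h1
          subst h1
          simp
    rw [loopA_succ, hstep]
    rw [show PySem.List.pyGet? [x] 0 = some x from PySem.List.pyGet?_zero_cons ..]
    rw [show PySem.List.pyGet? [x] (-1) = some x by rw [PySem.List.pyGet?_neg_one]; rfl]
    simp only [Option.getD_some]
    split
    · rfl
    · exact ih x

-- A's loop preserves length for lists of length ≥ 2
theorem loopA_length (f : Nat) : ∀ (l : List Int), 2 ≤ l.length →
    (myDumpLoopA f l).length = l.length := by
  induction f with
  | zero => intro l _; rfl
  | succ f ih =>
    intro l hl
    obtain ⟨a, mid, b, hs⟩ := decomp_two (PySem.List.sorted l (fun x => x) false)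
      (by rw [PySem.List.length_sorted]; omega)
    have hstep := stepA_eq l a b mid hs
    have hslen : mid.length + 2 = l.length := by
      have h0 : ((a : Int) :: (mid ++ [b])).length = l.length := by
        rw [← hs, PySem.List.length_sorted]
      simp at h0
      omega
    have hlen1 : (((a : Int) + 1) :: (mid ++ [b - 1])).length = mid.length + 2 := by simp
    rw [loopA_succ, hstep]
    split
    · rw [hlen1]; omega
    · rw [ih _ (by rw [hlen1]; omega), hlen1]; omega

-- ===== VERDICT (by name: the statement is the Claim_ definition above) =====
theorem my_dump_spec : Claim_equal_my_dump := by
  intro dump box_list _ hpre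
  unfold Spec_my_dump
  simp only [my_dump, my_dump_alt]
  by_cases h1 : box_list.length = 1
  · -- singleton list: A's loop keeps a singleton, spread 0; B returns 0 up front
    obtain ⟨x, hx⟩ : ∃ x, box_list = [x] := by
      match box_list, h1 with
      | [x], _ => exact ⟨x, rfl⟩
    subst hx
    have hsort : PySem.List.sorted [x] (fun y => y) false = [x] :=
      PySem.List.sorted_eq_self_of_pairwise _ _ (by simp)
    rw [loopA_singleton, hsort]
    rw [show PySem.List.pyGet? [x] 0 = some x from PySem.List.pyGet?_zero_cons ..]
    rw [show PySem.List.pyGet? [x] (-1) = some x by rw [PySem.List.pyGet?_neg_one]; rfl]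
    simp
  · -- length ≥ 2
    have h2 : 2 ≤ box_list.length := by
      cases box_list with
      | nil => exact absurd rfl hpre
      | cons x xs =>
        cases xs with
        | nil => simp at h1
        | cons y ys => simp
    have hkey := loop_eq dump.toNat box_list h2
    have hne : ((PySem.List.sorted box_list (fun x => x) false).length == 1) = false := by
      rw [PySem.List.length_sorted]; simp; omega
    rw [hne]
    simp only [Bool.false_eq_true, if_false]
    rw [← hkey]
    obtain ⟨a, mid, b, hs⟩ := decomp_two
      (PySem.List.sorted (myDumpLoopA dump.toNat box_list) (fun x => x) false)
      (by rw [PySem.List.length_sorted, loopA_length _ _ h2]; omega)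
    rw [hs]
    rw [show PySem.List.pyGet? (a :: (mid ++ [b])) 0 = some a from PySem.List.pyGet?_zero_cons ..]
    rw [show PySem.List.pyGet? (a :: (mid ++ [b])) (-1) = some b by
      rw [PySem.List.pyGet?_neg_one, getLast?_decomp]]
    rw [getLastD_decomp]
    simp
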